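-- pv_equiv track=rewrite | github.com/surenkutty/Dsa_Series | subarray/divisiblebyksubarr.py | max_subarray_divisible_by_k
-- ===== SOURCE A (Python) =====
-- def max_subarray_divisible_by_k(arr, k):
--     prefix_sum = 0
--     max_sum = 0
--
--     rem_map = {0: 0}  # remainder -> minimum prefix sum
--
--     for num in arr:
--         prefix_sum += num
--         rem = prefix_sum % k
--
--         if rem in rem_map:
--             curr = prefix_sum - rem_map[rem]
--
--             if curr > max_sum:   # instead of max()
--                 max_sum = curr
--         else:
--             rem_map[rem] = prefix_sum
--
--     return max_sum
-- ===== SOURCE B (Python) =====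
-- def max_subarray_divisible_by_k(arr, k):
--     # pass 1: all prefix sums, P_0 = 0
--     prefixes = [0]
--     for num in arr:
--         prefixes.append(prefixes[-1] + num)
--     # pass 2: pair each prefix with the FIRST earlier prefix of the same remainder class
--     best = 0
--     earlier = []
--     for p in prefixes:
--         for q in earlier:
--             if q % k == p % k:
--                 if p - q > best:
--                     best = p - q
--                 break
--         earlier.append(p)
--     return best
-- ===== Notes on version B (the rewrite author's own statement) =====
-- stated objective: alternative
-- what changed: Replaces A's single pass with a remainder-to-first-prefix dict by two explicit passes: build the full prefix-sum list, then for each prefix linearly scan the earlier prefixes for the first one in the same remainder class (no dict at all).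
-- outside the precondition, e.g. on max_subarray_divisible_by_k([1, 2], 0): A raises ZeroDivisionError, B raises ZeroDivisionError
import Mathlib
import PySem

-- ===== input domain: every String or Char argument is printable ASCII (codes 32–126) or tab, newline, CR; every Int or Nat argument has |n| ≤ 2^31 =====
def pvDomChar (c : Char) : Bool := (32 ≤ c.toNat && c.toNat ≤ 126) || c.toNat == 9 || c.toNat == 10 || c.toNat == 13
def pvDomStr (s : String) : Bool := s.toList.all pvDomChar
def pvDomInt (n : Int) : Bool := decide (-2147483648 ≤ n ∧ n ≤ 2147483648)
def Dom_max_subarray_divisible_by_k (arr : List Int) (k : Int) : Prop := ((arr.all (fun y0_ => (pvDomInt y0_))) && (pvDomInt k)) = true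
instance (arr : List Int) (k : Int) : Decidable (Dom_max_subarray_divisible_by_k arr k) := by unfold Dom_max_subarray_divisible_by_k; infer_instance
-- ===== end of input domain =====

-- B replaces A's remainder→first-prefix dict by two explicit passes over the list of prefix
-- sums with a linear first-match scan (alternative decomposition, no speed claim).

-- ===== PORT A =====
-- state: (prefix_sum, max_sum, rem_map)
def max_subarray_divisible_by_k (arr : List Int) (k : Int) : Int :=
  (arr.foldl
    (fun st num =>
      let prefix_sum := st.1 + num
      let rem := PySem.Int.mod prefix_sum k
      if (st.2.2).contains rem then
        let curr := prefix_sum - (st.2.2).getD rem 0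
        (prefix_sum, if curr > st.2.1 then curr else st.2.1, st.2.2)
      else
        (prefix_sum, st.2.1, (st.2.2).insert rem prefix_sum))
    ((0 : Int), (0 : Int), (PySem.Dict.ofList [((0 : Int), (0 : Int))] : PySem.Dict Int Int))).2.1

-- ===== PORT B =====
-- inner loop of pass 2: 'for q in earlier: if q % k == p % k: …; break'
def pvInnerScan (k p best : Int) : List Int → Int
  | [] => best
  | q :: rest =>
      if PySem.Int.mod q k == PySem.Int.mod p k then
        (if p - q > best then p - q else best)
      else
        pvInnerScan k p best rest

def max_subarray_divisible_by_k_alt (arr : List Int) (k : Int) : Int :=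
  let prefixes := arr.foldl (fun ps num => ps ++ [PySem.List.pyGetD ps (-1) 0 + num]) [(0 : Int)]
  (prefixes.foldl (fun st p => (pvInnerScan k p st.1 st.2, st.2 ++ [p])) ((0 : Int), ([] : List Int))).1

-- ===== PRECONDITION & SPEC =====
-- Pre_ excludes exactly the inputs where the Python A raises ZeroDivisionError:
-- k = 0 with a nonempty arr (the loop computes prefix_sum % 0).
def Pre_max_subarray_divisible_by_k (arr : List Int) (k : Int) : Prop := arr = [] ∨ k ≠ 0
instance (arr : List Int) (k : Int) : Decidable (Pre_max_subarray_divisible_by_k arr k) := by unfold Pre_max_subarray_divisible_by_k; infer_instance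
def pvWitness_max_subarray_divisible_by_k : List Int × Int := ([3, -1, 4, 1, -5, 9], 5)

def Spec_max_subarray_divisible_by_k (arr : List Int) (k : Int) (out : Int) : Prop := out = max_subarray_divisible_by_k_alt arr k
instance (arr : List Int) (k : Int) (out : Int) : Decidable (Spec_max_subarray_divisible_by_k arr k out) := by unfold Spec_max_subarray_divisible_by_k; infer_instance

-- ===== CLAIM (what is proved, stated in full; the proofs are below) =====
def Claim_equal_max_subarray_divisible_by_k : Prop := ∀ (arr : List Int) (k : Int), Dom_max_subarray_divisible_by_k arr k → Pre_max_subarray_divisible_by_k arr k → Spec_max_subarray_divisible_by_k arr k (max_subarray_divisible_by_k arr k)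

-- ===== LEMMAS AND PROOFS =====

-- the tail of the prefix-sum list starting from running total s
def pvTailPref (s : Int) : List Int → List Int
  | [] => []
  | n :: t => (s + n) :: pvTailPref (s + n) t

-- B's pass 1 builds s-prefixed prefix sums
theorem pvPass1 (arr : List Int) (ps : List Int) (s : Int) (h : ps ≠ [])
    (hlast : PySem.List.pyGetD ps (-1) 0 = s) :
    arr.foldl (fun ps num => ps ++ [PySem.List.pyGetD ps (-1) 0 + num]) ps
      = ps ++ pvTailPref s arr := by
  induction arr generalizing ps s with
  | nil => simp [pvTailPref]
  | cons n t ih =>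
      simp only [List.foldl_cons, pvTailPref, hlast]
      rw [ih (ps ++ [s + n]) (s + n) (by simp)
        (by simp [PySem.List.pyGetD, PySem.List.pyGet?, PySem.List.pyIdx?])]
      simp

-- pvInnerScan is first-match on the remainder
theorem pvInnerScan_eq (k p best : Int) (seen : List Int) :
    pvInnerScan k p best seen
      = match seen.find? (fun q => PySem.Int.mod q k == PySem.Int.mod p k) with
        | some q => if p - q > best then p - q else best
        | none => best := by
  induction seen with
  | nil => simp [pvInnerScan]
  | cons q rest ih =>
      by_cases h : PySem.Int.mod q k == PySem.Int.mod p k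
      · simp [pvInnerScan, h, List.find?]
      · simp only [pvInnerScan, h, List.find?]
        simpa [h] using ih

-- main simulation invariant between A's fold state and B's pass-2 fold state
theorem pvSim (k : Int) (arr : List Int) (s m : Int) (d : PySem.Dict Int Int)
    (seen : List Int)
    (hinv : ∀ r, d.get? r = seen.find? (fun q => PySem.Int.mod q k == r)) :
    (arr.foldl
      (fun st num =>
        let prefix_sum := st.1 + num
        let rem := PySem.Int.mod prefix_sum k
        if (st.2.2).contains rem then
          let curr := prefix_sum - (st.2.2).getD rem 0
          (prefix_sum, if curr > st.2.1 then curr else st.2.1, st.2.2)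
        else
          (prefix_sum, st.2.1, (st.2.2).insert rem prefix_sum))
      (s, m, d)).2.1
    = ((pvTailPref s arr).foldl (fun st p => (pvInnerScan k p st.1 st.2, st.2 ++ [p])) (m, seen)).1 := by
  induction arr generalizing s m d seen with
  | nil => simp [pvTailPref]
  | cons num t ih =>
      simp only [pvTailPref, List.foldl_cons]
      set p := s + num with hp
      set r := PySem.Int.mod p k with hr
      by_cases hc : d.contains r
      · -- remainder already seen: find? succeeds with the stored first prefix
        have hsome : (d.get? r).isSome := by rw [← PySem.Dict.contains_eq_isSome_get?]; exact hc
        obtain ⟨q, hq⟩ : ∃ q, d.get? r = some q := Option.isSome_iff_exists.mp hsome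
        have hfind : seen.find? (fun q' => PySem.Int.mod q' k == r) = some q := by
          rw [← hinv]; exact hq
        have hgetD : d.getD r 0 = q := by
          rw [PySem.Dict.getD_eq_get?_getD, hq]; rfl
        simp only [hc, if_true, hgetD]
        rw [pvInnerScan_eq, ← hr, hfind]
        apply ih
        intro r'
        rw [hinv r', List.find?_append]
        cases hfs : seen.find? (fun q' => PySem.Int.mod q' k == r') with
        | some _ => simp
        | none =>
            simp only [Option.none_or]
            have : (PySem.Int.mod p k == r') = false := by
              by_cases h' : r' = r
              · subst h'; rw [hfs] at hfind; cases hfind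
              · simp [← hr]; intro h''; exact h' h''.symm
            simp [List.find?, this]
      · -- fresh remainder: find? fails, A inserts, B appends
        have hnone : d.get? r = none := by
          cases hg : d.get? r with
          | none => rfl
          | some v =>
              exfalso
              have : d.contains r := by rw [PySem.Dict.contains_eq_isSome_get?, hg]; rfl
              exact hc this
        have hfind : seen.find? (fun q' => PySem.Int.mod q' k == r) = none := by
          rw [← hinv]; exact hnone
        simp only [hc]
        rw [pvInnerScan_eq, ← hr, hfind]
        apply ih
        intro r'
        rw [PySem.Dict.get?_insert, hinv r', List.find?_append]
        by_cases h' : r' = r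
        · subst h'
          rw [hfind]
          simp [List.find?, ← hr]
        · have : (PySem.Int.mod p k == r') = false := by
            simp [← hr]; intro h''; exact h' h''.symm
          cases hfs : seen.find? (fun q' => PySem.Int.mod q' k == r') with
          | some _ => simp [h']
          | none => simp [List.find?, this, h']

-- ===== VERDICT (by name: the statement is the Claim_ definition above) =====
theorem max_subarray_divisible_by_k_spec : Claim_equal_max_subarray_divisible_by_k := by
  intro arr k _ _
  unfold Spec_max_subarray_divisible_by_k max_subarray_divisible_by_k max_subarray_divisible_by_k_alt
  rw [pvPass1 arr [(0 : Int)] 0 (by simp) (by decide)]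
  simp only [List.cons_append, List.nil_append, List.foldl_cons]
  rw [pvSim k arr 0 0 _ [0] (fun r => by
    have hm : PySem.Int.mod 0 k = 0 := by simp [PySem.Int.mod]
    have hd : (PySem.Dict.ofList [((0 : Int), (0 : Int))] : PySem.Dict Int Int)
        = PySem.Dict.mk [((0 : Int), (0 : Int))] := rfl
    rw [hd, PySem.Dict.get?_mk_cons]
    simp only [List.find?, hm, PySem.Dict.get?]
    by_cases h : (0 : Int) = r
    · simp [h]
    · have hb : ((0 : Int) == r) = false := by simp [h]
      rw [hb]; simp)]
  rfl
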